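-- pv_equiv track=rewrite | github.com/NothingToDooo/one_build | templates/tools/llmwiki_tool.py | offsets_to_lines
-- ===== SOURCE A (Python) =====
-- def offsets_to_lines(text: str, start: int, end: int) -> tuple[int, int]:
--     """把字符偏移转为 1-based 行号。"""
--     line = 1
--     line_start = 1
--     line_end = 1
--     seen_start = False
--     seen_end = False
--     for index, char in enumerate(text):
--         if not seen_start and index >= start:
--             line_start = line
--             seen_start = True
--         if not seen_end and index >= end:
--             line_end = line
--             seen_end = True
--             break
--         if char == "\n":
--             line += 1
--     if not seen_start:
--         line_start = line
--     if not seen_end: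
--         line_end = line
--     return line_start, max(line_start, line_end)
-- ===== SOURCE B (Python) =====
-- def offsets_to_lines(text: str, start: int, end: int) -> tuple[int, int]:
--     """把字符偏移转为 1-based 行号。预建换行索引 + 二分查找。"""
--     newlines = [i for i, c in enumerate(text) if c == "\n"]
--     n = len(text)
--
--     def line(p: int) -> int:
--         q = 0 if p < 0 else n if p > n else p
--         lo, hi = 0, len(newlines)
--         while lo < hi:
--             mid = (lo + hi) // 2
--             if newlines[mid] < q:
--                 lo = mid + 1
--             else:
--                 hi = mid
--         return 1 + lo
--
--     return line(min(start, end)), line(end)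
-- ===== Notes on version B (the rewrite author's own statement) =====
-- stated objective: alternative
-- what changed: Replaces the stateful single scan with flags and an early break by a precomputed list of newline indices resolved by hand-written binary search over clamped offsets, with min(start,end) capturing the break semantics.
import Mathlib
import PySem

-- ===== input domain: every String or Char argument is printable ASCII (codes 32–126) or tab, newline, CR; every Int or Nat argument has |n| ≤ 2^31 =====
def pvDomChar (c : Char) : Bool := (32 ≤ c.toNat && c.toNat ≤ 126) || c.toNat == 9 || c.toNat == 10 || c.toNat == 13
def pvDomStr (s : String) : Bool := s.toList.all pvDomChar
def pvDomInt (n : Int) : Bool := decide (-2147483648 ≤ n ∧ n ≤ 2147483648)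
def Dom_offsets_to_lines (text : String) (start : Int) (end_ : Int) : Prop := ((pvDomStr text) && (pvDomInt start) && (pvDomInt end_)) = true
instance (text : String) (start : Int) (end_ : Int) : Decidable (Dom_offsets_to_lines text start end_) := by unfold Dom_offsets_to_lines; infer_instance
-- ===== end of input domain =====

-- B replaces A's stateful scan-with-break by a precomputed newline index resolved
-- with binary search over clamped offsets (alternative decomposition, same cost).


-- ===== PORT A =====
-- the for-loop of A, state (line, line_start, line_end, seen_start, seen_end); break = early return
def otlLoop (cs : List Char) (idx : Nat) (start end_ : Int)
    (line line_start line_end : Int) (seen_start seen_end : Bool) :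
    Int × Int × Int × Bool × Bool :=
  match cs with
  | [] => (line, line_start, line_end, seen_start, seen_end)
  | c :: rest =>
    let ls' := if !seen_start && (idx : Int) ≥ start then line else line_start
    let ss' := if !seen_start && (idx : Int) ≥ start then true else seen_start
    if !seen_end && (idx : Int) ≥ end_ then
      (line, ls', line, ss', true)
    else
      otlLoop rest (idx + 1) start end_ (if c = '\n' then line + 1 else line) ls' line_end ss' seen_end

def offsets_to_lines (text : String) (start : Int) (end_ : Int) : Int × Int :=
  let r := otlLoop text.toList 0 start end_ 1 1 1 false false
  let line := r.1
  let line_start := if r.2.2.2.1 then r.2.1 else line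
  let line_end := if r.2.2.2.2 then r.2.2.1 else line
  (line_start, max line_start line_end)

-- ===== PORT B =====
-- [i for i, c in enumerate(text) if c == "\n"]
def otlNewlines (cs : List Char) (i : Int) : List Int :=
  match cs with
  | [] => []
  | c :: rest => if c = '\n' then i :: otlNewlines rest (i + 1) else otlNewlines rest (i + 1)

-- the while-loop of B's binary search
def otlBsearch (nl : List Int) (q : Int) (lo hi : Nat) : Nat :=
  if _h : lo < hi then
    let mid := (lo + hi) / 2
    if nl.getD mid 0 < q then otlBsearch nl q (mid + 1) hi
    else otlBsearch nl q lo mid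
  else lo
termination_by hi - lo
decreasing_by all_goals omega

-- the inner function line(p) of B
def otlLine (nl : List Int) (n : Int) (p : Int) : Int :=
  let q := if p < 0 then 0 else if p > n then n else p
  1 + (otlBsearch nl q 0 nl.length : Int)

def offsets_to_lines_alt (text : String) (start : Int) (end_ : Int) : Int × Int :=
  let nl := otlNewlines text.toList 0
  let n : Int := (text.toList.length : Int)
  (otlLine nl n (min start end_), otlLine nl n end_)

-- ===== PRECONDITION & SPEC =====
def Spec_offsets_to_lines (text : String) (start : Int) (end_ : Int) (out : Int × Int) : Prop := out = offsets_to_lines_alt text start end_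
instance (text : String) (start : Int) (end_ : Int) (out : Int × Int) : Decidable (Spec_offsets_to_lines text start end_ out) := by unfold Spec_offsets_to_lines; infer_instance

-- ===== CLAIM (what is proved, stated in full; the proofs are below) =====
def Claim_equal_offsets_to_lines : Prop := ∀ (text : String) (start : Int) (end_ : Int), Dom_offsets_to_lines text start end_ → Spec_offsets_to_lines text start end_ (offsets_to_lines text start end_)

-- ===== LEMMAS AND PROOFS =====

-- number of '\n' among the first k characters
def otlCnt : List Char → Nat → Nat
  | _, 0 => 0
  | [], _ + 1 => 0
  | c :: rest, k + 1 => (if c = '\n' then 1 else 0) + otlCnt rest k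

lemma otlCnt_nil (k : Nat) : otlCnt [] k = 0 := by cases k <;> rfl

lemma otlCnt_mono (cs : List Char) : ∀ a b : Nat, a ≤ b → otlCnt cs a ≤ otlCnt cs b := by
  induction cs with
  | nil => intro a b _; simp [otlCnt_nil]
  | cons c rest ih =>
    intro a b hab
    cases a with
    | zero =>
      cases b with
      | zero => exact le_refl _
      | succ b => simp [otlCnt]
    | succ a =>
      cases b with
      | zero => omega
      | succ b => simp only [otlCnt]; have := ih a b (by omega); omega

-- post-processing after A's loop
def otlFinish (r : Int × Int × Int × Bool × Bool) : Int × Int :=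
  let line := r.1
  let ls := if r.2.2.2.1 then r.2.1 else line
  let le := if r.2.2.2.2 then r.2.2.1 else line
  (ls, max ls le)

lemma otl_shift (e : Int) (idx len : Nat) (h : (idx : Int) < e) :
    min (e - idx).toNat (len + 1) = min (e - ((idx : Int) + 1)).toNat len + 1 := by
  omega

-- loop characterization once seen_start is set (line_start frozen at L)
lemma otlLoop_seen (cs : List Char) : ∀ (idx : Nat) (s e line L le : Int),
    otlFinish (otlLoop cs idx s e line L le true false) =
      (L, max L (line + otlCnt cs (min (e - idx).toNat cs.length))) := by
  induction cs with
  | nil => intro idx s e line L le; simp [otlLoop, otlFinish, otlCnt_nil]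
  | cons c rest ih =>
    intro idx s e line L le
    by_cases hbr : (idx : Int) ≥ e
    · have h0 : min (e - idx).toNat (c :: rest).length = 0 := by
        simp only [List.length_cons]; omega
      simp [otlLoop, hbr, otlFinish, h0, otlCnt]
    · have hlt : (idx : Int) < e := by omega
      have hke : (min (e - idx).toNat (c :: rest).length) =
          min (e - ((idx : Int) + 1)).toNat rest.length + 1 := by
        simp only [List.length_cons]; exact otl_shift e idx rest.length hlt
      simp only [otlLoop, Bool.not_true, Bool.false_and, Bool.false_eq_true, if_false,
        Bool.not_false, Bool.true_and]
      rw [if_neg (by simp; omega)]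
      rw [ih, hke]
      simp only [otlCnt]
      by_cases hnl : c = '\n' <;> simp [hnl] <;> omega

-- loop characterization from the initial state (both flags clear)
lemma otlLoop_main (cs : List Char) : ∀ (idx : Nat) (s e line ls le : Int),
    otlFinish (otlLoop cs idx s e line ls le false false) =
      (line + otlCnt cs (min (min s e - idx).toNat cs.length),
       max (line + otlCnt cs (min (min s e - idx).toNat cs.length))
           (line + otlCnt cs (min (e - idx).toNat cs.length))) := by
  induction cs with
  | nil => intro idx s e line ls le; simp [otlLoop, otlFinish, otlCnt_nil]
  | cons c rest ih =>
    intro idx s e line ls le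
    by_cases hbr : (idx : Int) ≥ e
    · have h0 : min (e - idx).toNat (c :: rest).length = 0 := by
        simp only [List.length_cons]; omega
      have h0' : min (min s e - idx).toNat (c :: rest).length = 0 := by
        simp only [List.length_cons]; omega
      by_cases hst : (idx : Int) ≥ s <;>
        simp [otlLoop, hbr, hst, otlFinish, h0, h0', otlCnt]
    · have hlt : (idx : Int) < e := by omega
      have hke : (min (e - idx).toNat (c :: rest).length) =
          min (e - ((idx : Int) + 1)).toNat rest.length + 1 := by
        simp only [List.length_cons]; exact otl_shift e idx rest.length hlt
      simp only [otlLoop, Bool.not_false, Bool.true_and]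
      rw [if_neg (show ¬ (decide ((idx : Int) ≥ e) = true) by simp; omega)]
      by_cases hst : (idx : Int) ≥ s
      · have h0' : min (min s e - idx).toNat (c :: rest).length = 0 := by
          simp only [List.length_cons]; omega
        have hd : decide ((idx : Int) ≥ s) = true := by simp; omega
        rw [if_pos hd, if_pos hd]
        rw [otlLoop_seen, h0', hke]
        simp only [otlCnt]
        by_cases hnl : c = '\n' <;> simp [hnl] <;> omega
      · have hkm : (min (min s e - idx).toNat (c :: rest).length) =
            min (min s e - ((idx : Int) + 1)).toNat rest.length + 1 := by
          simp only [List.length_cons]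
          exact otl_shift (min s e) idx rest.length (by omega)
        have hd : ¬ (decide ((idx : Int) ≥ s) = true) := by simp; omega
        rw [if_neg hd, if_neg hd]
        rw [ih, hkm, hke]
        simp only [otlCnt]
        by_cases hnl : c = '\n' <;> simp [hnl] <;> omega

-- every produced newline index is ≥ the base
lemma otlNewlines_ge (cs : List Char) : ∀ (b : Int) (x : Int), x ∈ otlNewlines cs b → b ≤ x := by
  induction cs with
  | nil => intro b x h; simp [otlNewlines] at h
  | cons c rest ih =>
    intro b x h
    by_cases hc : c = '\n' <;> simp [otlNewlines, hc] at h
    · rcases h with h | h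
      · omega
      · have := ih (b + 1) x h; omega
    · have := ih (b + 1) x h; omega

lemma otlNewlines_length (cs : List Char) : ∀ b : Int,
    (otlNewlines cs b).length = otlCnt cs cs.length := by
  induction cs with
  | nil => intro b; simp [otlNewlines, otlCnt_nil]
  | cons c rest ih =>
    intro b
    by_cases hc : c = '\n'
    · simp [otlNewlines, hc, otlCnt, ih]; omega
    · simp [otlNewlines, hc, otlCnt, ih]

-- indexed characterization: nl[i] < b + q iff i < (newlines among first q chars)
lemma otlNewlines_getD_lt (cs : List Char) : ∀ (b : Int) (q : Nat), q ≤ cs.length →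
    ∀ i : Nat, i < (otlNewlines cs b).length →
      ((otlNewlines cs b).getD i 0 < b + (q : Int) ↔ i < otlCnt cs q) := by
  induction cs with
  | nil => intro b q hq i hi; simp [otlNewlines] at hi
  | cons c rest ih =>
    intro b q hq i hi
    by_cases hc : c = '\n'
    · simp only [otlNewlines, hc, if_pos] at hi ⊢
      cases i with
      | zero =>
        cases q with
        | zero => simp [otlCnt]
        | succ q => simp [otlCnt, hc]
      | succ i =>
        simp only [List.getD_cons_succ, List.length_cons] at hi ⊢
        cases q with
        | zero =>
          simp only [otlCnt]
          constructor
          · intro h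
            exfalso
            have hmem : (otlNewlines rest (b + 1)).getD i 0 ∈ otlNewlines rest (b + 1) := by
              rw [List.getD_eq_getElem _ _ (by omega)]
              exact List.getElem_mem _
            have := otlNewlines_ge rest (b + 1) _ hmem
            omega
          · omega
        | succ q =>
          have := ih (b + 1) q (by simpa using hq) i (by omega)
          simp only [otlCnt, hc, if_pos]
          constructor
          · intro h
            have : i < otlCnt rest q := by rw [← this]; push_cast; omega
            omega
          · intro h
            have : (otlNewlines rest (b + 1)).getD i 0 < b + 1 + (q : Int) := by
              rw [this]; omega
            push_cast at this ⊢; omega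
    · simp only [otlNewlines, hc, if_neg, if_false] at hi ⊢
      cases q with
      | zero =>
        simp only [otlCnt]
        constructor
        · intro h
          exfalso
          have hmem : (otlNewlines rest (b + 1)).getD i 0 ∈ otlNewlines rest (b + 1) := by
            rw [List.getD_eq_getElem _ _ (by omega)]
            exact List.getElem_mem _
          have := otlNewlines_ge rest (b + 1) _ hmem
          omega
        · omega
      | succ q =>
        have := ih (b + 1) q (by simpa using hq) i hi
        simp only [otlCnt, hc, if_false, Nat.zero_add]
        rw [← this]
        constructor <;> intro h <;> push_cast at h ⊢ <;> omega

-- binary-search correctness given the threshold characterization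
lemma otlBsearch_eq (nl : List Int) (q : Int) (r : Nat)
    (H : ∀ i : Nat, i < nl.length → (nl.getD i 0 < q ↔ i < r)) :
    ∀ (d lo hi : Nat), hi - lo ≤ d → lo ≤ r → r ≤ hi → hi ≤ nl.length →
      otlBsearch nl q lo hi = r := by
  intro d
  induction d with
  | zero =>
    intro lo hi hd hlo hhi hlen
    rw [otlBsearch]
    rw [dif_neg (by omega)]
    omega
  | succ d ih =>
    intro lo hi hd hlo hhi hlen
    rw [otlBsearch]
    by_cases h : lo < hi
    · rw [dif_pos h]
      have hmid : (lo + hi) / 2 < nl.length := by omega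
      have hH := H ((lo + hi) / 2) hmid
      by_cases hlt : nl.getD ((lo + hi) / 2) 0 < q
      · rw [if_pos hlt]
        exact ih ((lo + hi) / 2 + 1) hi (by omega) (by omega) hhi hlen
      · rw [if_neg hlt]
        exact ih lo ((lo + hi) / 2) (by omega) hlo (by omega) (by omega)
    · rw [dif_neg h]; omega

-- B's line(p) computes 1 + newlines among the first clamp(p) characters
lemma otlLine_eq (cs : List Char) (p : Int) :
    otlLine (otlNewlines cs 0) (cs.length : Int) p =
      1 + (otlCnt cs (min p.toNat cs.length) : Int) := by
  have hr : ∀ q : Int, 0 ≤ q → q.toNat ≤ cs.length →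
      otlBsearch (otlNewlines cs 0) q 0 (otlNewlines cs 0).length = otlCnt cs q.toNat := by
    intro q hq0 hqn
    apply otlBsearch_eq (otlNewlines cs 0) q (otlCnt cs q.toNat) _
      (otlNewlines cs 0).length 0 (otlNewlines cs 0).length (by omega) (by omega) _ (le_refl _)
    · intro i hi
      have h := otlNewlines_getD_lt cs 0 q.toNat hqn i hi
      rw [← h]
      constructor <;> intro hx <;> omega
    · rw [otlNewlines_length cs 0]
      exact otlCnt_mono cs _ _ hqn
  simp only [otlLine]
  rw [hr _ (by split_ifs <;> omega) (by split_ifs <;> omega)]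
  have ht : (if p < 0 then 0 else if p > (cs.length : Int) then (cs.length : Int) else p).toNat =
      min p.toNat cs.length := by split_ifs <;> omega
  rw [ht]

-- ===== VERDICT (by name: the statement is the Claim_ definition above) =====
theorem offsets_to_lines_spec : Claim_equal_offsets_to_lines := by
  intro text s e _
  unfold Spec_offsets_to_lines
  show offsets_to_lines text s e = offsets_to_lines_alt text s e
  have hA : offsets_to_lines text s e =
      otlFinish (otlLoop text.toList 0 s e 1 1 1 false false) := rfl
  rw [hA, otlLoop_main]
  simp only [offsets_to_lines_alt]
  rw [otlLine_eq, otlLine_eq]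
  have hmin : (min s e - ((0 : Nat) : Int)).toNat = (min s e).toNat := by omega
  have hend : (e - ((0 : Nat) : Int)).toNat = e.toNat := by omega
  rw [hmin, hend]
  have hmono : otlCnt text.toList (min (min s e).toNat text.toList.length) ≤
      otlCnt text.toList (min e.toNat text.toList.length) := by
    apply otlCnt_mono
    omega
  rw [Prod.mk.injEq]
  constructor <;> omega
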